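-- pv_equiv track=rewrite | github.com/brokestar233/mc-auto-server-builder | src/mc_auto_server_builder/builder.py | _pick_asset_by_arch
-- ===== SOURCE A (Python) =====
-- def _pick_asset_by_arch(assets: list[dict], arch_aliases: set[str], is_windows: bool) -> dict | None:
--     preferred_ext = (".zip", ".tar.gz", ".tgz") if is_windows else (".tar.gz", ".tgz", ".zip")
--     candidates: list[dict] = []
--
--     for a in assets:
--         name = str(a.get("name", "")).lower()
--         if not any(name.endswith(ext) for ext in preferred_ext):
--             continue
--         if not any(alias in name for alias in arch_aliases):
--             continue
--         candidates.append(a)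
--
--     if not candidates:
--         return None
--
--     def score(item: dict) -> tuple[int, int]:
--         n = str(item.get("name", "")).lower()
--         ext_score = 0
--         for i, ext in enumerate(preferred_ext):
--             if n.endswith(ext):
--                 ext_score = len(preferred_ext) - i
--                 break
--         # 尽量优先 jdk 资产（排除 jre / test）
--         role_score = 2 if "jdk" in n else 1
--         if "jre" in n:
--             role_score = 0
--         return role_score, ext_score
--
--     return sorted(candidates, key=score, reverse=True)[0]
-- ===== SOURCE B (Python) =====
-- def _pick_asset_by_arch(assets, arch_aliases, is_windows):
--     preferred_ext = (".zip", ".tar.gz", ".tgz") if is_windows else (".tar.gz", ".tgz", ".zip")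
--     best = None
--     best_score = None
--     for a in assets:
--         name = str(a.get("name", "")).lower()
--         ext_score = 0
--         for i, ext in enumerate(preferred_ext):
--             if name.endswith(ext):
--                 ext_score = len(preferred_ext) - i
--                 break
--         if ext_score == 0:
--             continue
--         if not any(alias in name for alias in arch_aliases):
--             continue
--         role_score = 0 if "jre" in name else (2 if "jdk" in name else 1)
--         score = (role_score, ext_score)
--         if best is None or score > best_score:
--             best, best_score = a, score
--     return best
-- ===== Notes on version B (the rewrite author's own statement) =====
-- stated objective: simpler
-- what changed: Replaced A's build-a-candidates-list-then-stable-sort-and-take-first with a single pass that keeps a running best asset and its (role_score, ext_score) key, updating only on a strictly greater key so the earliest tie wins.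
import Mathlib
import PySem

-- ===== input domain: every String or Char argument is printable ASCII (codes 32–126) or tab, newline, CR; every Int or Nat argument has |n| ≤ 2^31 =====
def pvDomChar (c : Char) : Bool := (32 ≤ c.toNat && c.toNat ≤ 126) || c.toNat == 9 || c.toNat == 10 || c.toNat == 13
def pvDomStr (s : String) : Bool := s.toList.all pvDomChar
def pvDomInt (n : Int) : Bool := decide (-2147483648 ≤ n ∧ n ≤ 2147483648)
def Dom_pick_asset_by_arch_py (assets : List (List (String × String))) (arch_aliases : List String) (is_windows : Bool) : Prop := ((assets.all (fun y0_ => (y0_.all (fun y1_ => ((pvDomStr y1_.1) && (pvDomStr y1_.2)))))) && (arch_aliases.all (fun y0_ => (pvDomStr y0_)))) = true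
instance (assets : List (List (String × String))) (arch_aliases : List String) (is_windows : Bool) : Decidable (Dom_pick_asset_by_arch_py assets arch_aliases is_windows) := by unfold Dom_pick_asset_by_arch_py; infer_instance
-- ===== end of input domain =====

-- B replaces A's build-candidates-then-stable-sort with a single pass keeping the running best
-- (strictly-greater update so the earliest tie wins); objective: simpler.

-- shared helpers (both Pythons compute these identically)
def pvExt (is_windows : Bool) : List String :=
  if is_windows then [".zip", ".tar.gz", ".tgz"] else [".tar.gz", ".tgz", ".zip"]

def pvName (a : List (String × String)) : String :=
  PySem.Str.lower (PySem.Dict.getD (PySem.Dict.mk a) "name" "")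

-- 'for i, ext in enumerate(preferred_ext): if name.endswith(ext): ext_score = len - i; break'
def pvExtScoreAux (n : String) (total : Nat) : Nat → List String → Int
  | _, [] => 0
  | i, e :: rest => if PySem.Str.endswith n e then ((total : Int) - (i : Int)) else pvExtScoreAux n total (i + 1) rest

-- ===== PORT A =====
def pick_asset_by_arch_py (assets : List (List (String × String))) (arch_aliases : List String) (is_windows : Bool) : Option (List (String × String)) :=
  let preferred_ext := pvExt is_windows
  let candidates := assets.foldl (fun cand a =>
      let name := pvName a
      if !(preferred_ext.any fun ext => PySem.Str.endswith name ext) then cand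
      else if !(arch_aliases.any fun al => PySem.Str.isIn al name) then cand
      else cand ++ [a]) []
  if candidates.isEmpty then none
  else (PySem.List.sorted2 candidates
        (fun item =>
          let n := pvName item
          let r0 : Int := if PySem.Str.isIn "jdk" n then 2 else 1
          if PySem.Str.isIn "jre" n then 0 else r0)
        (fun item => pvExtScoreAux (pvName item) preferred_ext.length 0 preferred_ext)
        true).head?

-- ===== PORT B =====
def pick_asset_by_arch_py_alt (assets : List (List (String × String))) (arch_aliases : List String) (is_windows : Bool) : Option (List (String × String)) :=
  let preferred_ext := pvExt is_windows
  (assets.foldl (fun best a =>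
      let name := pvName a
      let ext_score := pvExtScoreAux name preferred_ext.length 0 preferred_ext
      if ext_score == 0 then best
      else if !(arch_aliases.any fun al => PySem.Str.isIn al name) then best
      else
        let role_score : Int := if PySem.Str.isIn "jre" name then 0 else if PySem.Str.isIn "jdk" name then 2 else 1
        match best with
        | none => some (a, role_score, ext_score)
        | some (_, br, be) =>
            if br < role_score || (br == role_score && be < ext_score) then some (a, role_score, ext_score)
            else best)
    none).map (·.1)

-- ===== PRECONDITION & SPEC =====
def Spec_pick_asset_by_arch_py (assets : List (List (String × String))) (arch_aliases : List String) (is_windows : Bool) (out : Option (List (String × String))) : Prop := out = pick_asset_by_arch_py_alt assets arch_aliases is_windows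
instance (assets : List (List (String × String))) (arch_aliases : List String) (is_windows : Bool) (out : Option (List (String × String))) : Decidable (Spec_pick_asset_by_arch_py assets arch_aliases is_windows out) := by unfold Spec_pick_asset_by_arch_py; infer_instance

-- ===== CLAIM (what is proved, stated in full; the proofs are below) =====
def Claim_equal_pick_asset_by_arch_py : Prop := ∀ (assets : List (List (String × String))) (arch_aliases : List String) (is_windows : Bool), Dom_pick_asset_by_arch_py assets arch_aliases is_windows → Spec_pick_asset_by_arch_py assets arch_aliases is_windows (pick_asset_by_arch_py assets arch_aliases is_windows)

-- ===== LEMMAS AND PROOFS =====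

-- proof-only abbreviations
def pvK1 (a : List (String × String)) : Int :=
  if PySem.Str.isIn "jre" (pvName a) then 0 else if PySem.Str.isIn "jdk" (pvName a) then 2 else 1

def pvK2 (pref : List String) (a : List (String × String)) : Int :=
  pvExtScoreAux (pvName a) pref.length 0 pref

def pvCand (pref aliases : List String) (a : List (String × String)) : Bool :=
  (pref.any fun ext => PySem.Str.endswith (pvName a) ext) && (aliases.any fun al => PySem.Str.isIn al (pvName a))

def pvUpd (pref : List String) (best : Option (List (String × String) × Int × Int)) (a : List (String × String)) :
    Option (List (String × String) × Int × Int) :=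
  match best with
  | none => some (a, pvK1 a, pvK2 pref a)
  | some (_, br, be) =>
      if br < pvK1 a || (br == pvK1 a && be < pvK2 pref a) then some (a, pvK1 a, pvK2 pref a) else best

def pvHead (pref : List String) (s : List (List (String × String))) : Option (List (String × String) × Int × Int) :=
  match s with
  | [] => none
  | h :: _ => some (h, pvK1 h, pvK2 pref h)

-- the 'before' predicate sorted2 with reverse=true uses
def pvBefore (pref : List String) (x y : List (String × String)) : Bool :=
  decide (pvK1 y < pvK1 x) || (!decide (pvK1 x < pvK1 y) && decide (pvK2 pref y < pvK2 pref x))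

theorem pvExtScoreAux_eq_zero (n : String) (total : Nat) :
    ∀ (rest : List String) (i : Nat), i + rest.length ≤ total →
      (pvExtScoreAux n total i rest = 0 ↔ rest.any (fun e => PySem.Str.endswith n e) = false) := by
  intro rest
  induction rest with
  | nil => intro i _; simp [pvExtScoreAux]
  | cons e t ih =>
    intro i hle
    simp only [pvExtScoreAux, List.any_cons]
    cases he : PySem.Str.endswith n e with
    | true =>
      have h' : i + (t.length + 1) ≤ total := by simpa using hle
      have hne : (total : Int) - (i : Int) ≠ 0 := by omega
      simp only [if_pos, Bool.true_or]
      exact ⟨fun h0 => absurd h0 hne, fun h => by cases h⟩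
    | false =>
      simp only [Bool.false_eq_true, Bool.false_or]
      exact ih (i + 1) (by simp only [List.length_cons] at hle; omega)

theorem pvHead_insertBy (pref : List String) (x : List (String × String)) (s : List (List (String × String))) :
    pvHead pref (PySem.List.insertBy (pvBefore pref) x s) = pvUpd pref (pvHead pref s) x := by
  cases s with
  | nil => rfl
  | cons h t =>
    simp only [PySem.List.insertBy, pvHead, pvUpd]
    have hb : pvBefore pref x h = (pvK1 h < pvK1 x || (pvK1 h == pvK1 x && pvK2 pref h < pvK2 pref x)) := by
      simp only [pvBefore]
      by_cases h1 : pvK1 h < pvK1 x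
      · simp [h1]
      · by_cases h2 : pvK1 x < pvK1 h
        · have : ¬ pvK1 h == pvK1 x := by simp; omega
          simp [h1, h2, this]
        · have : pvK1 h == pvK1 x := by simp; omega
          simp [h1, h2, this]
    rw [hb]
    by_cases hc : (pvK1 h < pvK1 x || (pvK1 h == pvK1 x && pvK2 pref h < pvK2 pref x)) = true
    · simp [hc]
    · simp [hc]

theorem pvHead_foldl (pref : List String) (cs : List (List (String × String))) :
    ∀ s, pvHead pref (cs.foldl (fun acc x => PySem.List.insertBy (pvBefore pref) x acc) s)
      = cs.foldl (pvUpd pref) (pvHead pref s) := by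
  induction cs with
  | nil => intro s; rfl
  | cons c t ih =>
    intro s
    simp only [List.foldl_cons]
    rw [ih, pvHead_insertBy]

theorem pvHead?_eq (pref : List String) (s : List (List (String × String))) :
    s.head? = (pvHead pref s).map (fun x => x.1) := by
  cases s <;> rfl

theorem pvSorted2_eq_fold (pref : List String) (cs : List (List (String × String))) :
    PySem.List.sorted2 cs
        (fun item =>
          let n := pvName item
          let r0 : Int := if PySem.Str.isIn "jdk" n then 2 else 1
          if PySem.Str.isIn "jre" n then 0 else r0)
        (fun item => pvExtScoreAux (pvName item) pref.length 0 pref) true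
      = cs.foldl (fun acc x => PySem.List.insertBy (pvBefore pref) x acc) [] := rfl

theorem pvFinal (pref : List String) (cs : List (List (String × String))) :
    (if cs.isEmpty then none
     else (PySem.List.sorted2 cs
        (fun item =>
          let n := pvName item
          let r0 : Int := if PySem.Str.isIn "jdk" n then 2 else 1
          if PySem.Str.isIn "jre" n then 0 else r0)
        (fun item => pvExtScoreAux (pvName item) pref.length 0 pref) true).head?)
      = (cs.foldl (pvUpd pref) none).map (fun x => x.1) := by
  cases cs with
  | nil => rfl
  | cons c t =>
    simp only [List.isEmpty_cons, Bool.false_eq_true, if_false]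
    rw [pvSorted2_eq_fold, pvHead?_eq pref, pvHead_foldl pref (c :: t) []]
    rfl

-- ===== VERDICT (by name: the statement is the Claim_ definition above) =====
theorem pick_asset_by_arch_py_spec : Claim_equal_pick_asset_by_arch_py := by
  intro assets arch_aliases is_windows _
  unfold Spec_pick_asset_by_arch_py pick_asset_by_arch_py pick_asset_by_arch_py_alt
  set pref := pvExt is_windows with hpref
  -- rewrite A's candidate loop to a filter
  have hA : assets.foldl (fun cand a =>
      let name := pvName a
      if !(pref.any fun ext => PySem.Str.endswith name ext) then cand
      else if !(arch_aliases.any fun al => PySem.Str.isIn al name) then cand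
      else cand ++ [a]) [] = assets.filter (pvCand pref arch_aliases) := by
    rw [PySem.List.foldl_congr_mem _ _ (fun cand a => if pvCand pref arch_aliases a then cand ++ [a] else cand)]
    · exact PySem.List.foldl_append_if_eq_filter _ _ []
    · intro acc x _
      cases h1 : (pref.any fun ext => PySem.Str.endswith (pvName x) ext) <;>
        cases h2 : (arch_aliases.any fun al => PySem.Str.isIn al (pvName x)) <;>
          · simp only [pvCand, h1, h2]
            simp
  -- rewrite B's loop to a filtered fold of pvUpd
  have hB : assets.foldl (fun best a =>
      let name := pvName a
      let ext_score := pvExtScoreAux name pref.length 0 pref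
      if ext_score == 0 then best
      else if !(arch_aliases.any fun al => PySem.Str.isIn al name) then best
      else
        let role_score : Int := if PySem.Str.isIn "jre" name then 0 else if PySem.Str.isIn "jdk" name then 2 else 1
        match best with
        | none => some (a, role_score, ext_score)
        | some (_, br, be) =>
            if br < role_score || (br == role_score && be < ext_score) then some (a, role_score, ext_score)
            else best) none
      = (assets.filter (pvCand pref arch_aliases)).foldl (pvUpd pref) none := by
    rw [PySem.List.foldl_congr_mem _ _ (fun best a => if pvCand pref arch_aliases a then pvUpd pref best a else best)]
    · exact PySem.List.foldl_if_eq_foldl_filter _ _ _ none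
    · intro acc x _
      have hz := pvExtScoreAux_eq_zero (pvName x) pref.length pref 0 (by omega)
      cases h1 : (pref.any fun ext => PySem.Str.endswith (pvName x) ext) with
      | false =>
        have hzr : pvExtScoreAux (pvName x) pref.length 0 pref = 0 := hz.mpr h1
        simp only [pvCand, h1, hzr]
        simp
      | true =>
        have hnz : pvExtScoreAux (pvName x) pref.length 0 pref ≠ 0 := by
          intro h0
          rw [hz.mp h0] at h1
          exact Bool.false_ne_true h1
        cases h2 : (arch_aliases.any fun al => PySem.Str.isIn al (pvName x)) <;>
          · simp only [pvCand, pvUpd, pvK1, pvK2, h1, h2]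
            simp [hnz]
  simp only [hA, hB]
  exact pvFinal pref (assets.filter (pvCand pref arch_aliases))
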